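-- pv_equiv track=rewrite | github.com/yejing97/Edge_GAT | post_traintement.py | find_duplicates_except_zero
-- ===== SOURCE A (Python) =====
-- def find_duplicates_except_zero(list):
--     seen = {}
--     duplicate_indices = []
--
--     for i in range(len(list)):
--         if list[i] != 0:
--             if list[i]  not in seen:
--                 seen[list[i]] = i
--             else:
--                 # duplicate_indices[seen[list[i]]] = i
--                 duplicate_indices.append([seen[list[i]], i])
--     grouped_dict = {}
--     for sublist in duplicate_indices:
--         key = sublist[0]
--         value = sublist[1:]
--         grouped_dict.setdefault(key, []).extend(value)
--     out = []
--     for key in grouped_dict: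
--         out.append([key] + grouped_dict[key])
--     return out
-- ===== SOURCE B (Python) =====
-- def find_duplicates_except_zero(list):
--     # One pass: collect all indices of each nonzero value; record a value in
--     # `order` the moment its second occurrence appears.
--     positions = {}
--     order = []
--     for i, v in enumerate(list):
--         if v != 0:
--             ps = positions.setdefault(v, [])
--             ps.append(i)
--             if len(ps) == 2:
--                 order.append(v)
--     return [positions[v] for v in order]
-- ===== Notes on version B (the rewrite author's own statement) =====
-- stated objective: simpler
-- what changed: Single pass with enumerate collecting all indices of each nonzero value in one dict and recording a value the moment its second occurrence appears, instead of A's three phases (first-index dict + duplicate-pair list, regrouping the pairs into a second dict keyed by first index, and a final emission loop).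
import Mathlib
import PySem

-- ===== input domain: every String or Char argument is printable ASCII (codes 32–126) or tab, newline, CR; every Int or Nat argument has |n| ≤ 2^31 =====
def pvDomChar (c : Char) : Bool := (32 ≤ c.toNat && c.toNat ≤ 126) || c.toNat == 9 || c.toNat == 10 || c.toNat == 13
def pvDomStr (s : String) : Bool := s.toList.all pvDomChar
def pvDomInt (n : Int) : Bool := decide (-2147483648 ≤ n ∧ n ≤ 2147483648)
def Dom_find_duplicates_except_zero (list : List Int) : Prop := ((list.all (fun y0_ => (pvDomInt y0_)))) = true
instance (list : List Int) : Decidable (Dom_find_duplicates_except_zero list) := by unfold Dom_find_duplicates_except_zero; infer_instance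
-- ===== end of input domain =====

-- B groups all indices of each nonzero value in one enumerate pass (recording a value when its
-- second occurrence appears), instead of A's pair-list + regroup + emit phases; same output.

-- ===== PORT A =====
-- loop body of A's first for-loop, on the pair (i, list[i])
def aLoop1 (st : PySem.Dict Int Int × List (List Int)) (p : Int × Int) :
    PySem.Dict Int Int × List (List Int) :=
  if p.2 ≠ 0 then
    if st.1.contains p.2 = false then (st.1.insert p.2 p.1, st.2)
    else (st.1, st.2 ++ [[st.1.getD p.2 0, p.1]])   -- seen[list[i]]: key present, getD exact
  else st

def find_duplicates_except_zero (list : List Int) : List (List Int) :=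
  -- for i in range(len(list)): … list[i] …   (index always in range, pyGetD exact)
  let st := (PySem.List.pyRange 0 (PySem.List.len list) 1).foldl
    (fun st i => aLoop1 st (i, PySem.List.pyGetD list i 0)) (PySem.Dict.empty, [])
  -- grouped_dict.setdefault(key, []).extend(value)  =  modify key [] (· ++ value)
  let grouped := st.2.foldl
    (fun (g : PySem.Dict Int (List Int)) sub =>
      g.modify (PySem.List.pyGetD sub 0 0) [] (· ++ PySem.List.slice sub (some 1) none))
    PySem.Dict.empty
  -- for key in grouped_dict: out.append([key] + grouped_dict[key])
  grouped.keys.foldl (fun out k => out ++ [k :: grouped.getD k []]) []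

-- ===== PORT B =====
-- loop body of B's single enumerate pass: positions.setdefault(v, []).append(i) in value form
def bLoop (st : PySem.Dict Int (List Int) × List Int) (p : Int × Int) :
    PySem.Dict Int (List Int) × List Int :=
  if p.2 ≠ 0 then
    let ps := st.1.getD p.2 [] ++ [p.1]
    (st.1.insert p.2 ps, if ps.length = 2 then st.2 ++ [p.2] else st.2)
  else st

def find_duplicates_except_zero_alt (list : List Int) : List (List Int) :=
  let st := (PySem.List.enumerate list 0).foldl bLoop (PySem.Dict.empty, [])
  st.2.map (fun v => st.1.getD v [])   -- positions[v]: key present, getD exact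

-- ===== PRECONDITION & SPEC =====
def Spec_find_duplicates_except_zero (list : List Int) (out : List (List Int)) : Prop := out = find_duplicates_except_zero_alt list
instance (list : List Int) (out : List (List Int)) : Decidable (Spec_find_duplicates_except_zero list out) := by unfold Spec_find_duplicates_except_zero; infer_instance

-- ===== CLAIM (what is proved, stated in full; the proofs are below) =====
def Claim_equal_find_duplicates_except_zero : Prop := ∀ (list : List Int), Dom_find_duplicates_except_zero list → Spec_find_duplicates_except_zero list (find_duplicates_except_zero list)

-- ===== LEMMAS AND PROOFS =====

-- pair-level view of A's first loop (duplicate pairs as Int × Int instead of 2-element lists)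
def aPair (st : PySem.Dict Int Int × List (Int × Int)) (p : Int × Int) :
    PySem.Dict Int Int × List (Int × Int) :=
  if p.2 ≠ 0 then
    if st.1.contains p.2 = false then (st.1.insert p.2 p.1, st.2)
    else (st.1, st.2 ++ [(st.1.getD p.2 0, p.1)])
  else st

theorem afold_pair (e : List (Int × Int)) : ∀ (seen : PySem.Dict Int Int) (P : List (Int × Int)),
    e.foldl aLoop1 (seen, P.map (fun p => [p.1, p.2])) =
      ((e.foldl aPair (seen, P)).1, (e.foldl aPair (seen, P)).2.map (fun p => [p.1, p.2])) := by
  induction e with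
  | nil => intro seen P; rfl
  | cons p e ih =>
    intro seen P
    simp only [List.foldl_cons]
    have hstep : aLoop1 (seen, P.map (fun p => [p.1, p.2])) p =
        ((aPair (seen, P) p).1, (aPair (seen, P) p).2.map (fun p => [p.1, p.2])) := by
      simp only [aLoop1, aPair]
      split_ifs <;> simp
    rw [hstep]
    exact ih (aPair (seen, P) p).1 (aPair (seen, P) p).2

-- the invariant tying A's state (seen, duplicate pairs P) to B's state (positions, order);
-- n is the next index to be processed
def pvInv (n : Int) (seen : PySem.Dict Int Int) (P : List (Int × Int))
    (pos : PySem.Dict Int (List Int)) (ord : List Int) : Prop :=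
  (∀ v, seen.contains v = pos.contains v) ∧
  (∀ v, pos.contains v = true → ∃ a t, pos.getD v [] = a :: t ∧ seen.getD v 0 = a) ∧
  (∀ v, v ∈ ord ↔ (pos.contains v = true ∧ 2 ≤ (pos.getD v []).length)) ∧
  (∀ v w, pos.contains v = true → pos.contains w = true →
      seen.getD v 0 = seen.getD w 0 → v = w) ∧
  (∀ v, pos.contains v = true → ∀ j ∈ pos.getD v [], j < n) ∧
  (PySem.Set.ofList (P.map (fun p => p.1)) = ord.map (fun v => seen.getD v 0)) ∧
  (∀ v ∈ ord, seen.getD v 0 :: (P.filter (fun p => p.1 == seen.getD v 0)).map (fun p => p.2) = pos.getD v []) ∧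
  ord.Nodup

theorem pvInv_one (n : Int) (seen : PySem.Dict Int Int) (P : List (Int × Int))
    (pos : PySem.Dict Int (List Int)) (ord : List Int) (x : Int)
    (h : pvInv n seen P pos ord) :
    pvInv (n + 1) (aPair (seen, P) (n, x)).1 (aPair (seen, P) (n, x)).2
      (bLoop (pos, ord) (n, x)).1 (bLoop (pos, ord) (n, x)).2 := by
  obtain ⟨h1, h2, h3, h4, h5, h6, h7, h8⟩ := h
  by_cases hx0 : x = 0
  · subst hx0
    have hA : aPair (seen, P) (n, 0) = (seen, P) := by
      simp only [aPair]; simp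
    have hB : bLoop (pos, ord) (n, 0) = (pos, ord) := by
      simp only [bLoop]; simp
    rw [hA, hB]
    exact ⟨h1, h2, h3, h4, fun v hv j hj => by have := h5 v hv j hj; omega, h6, h7, h8⟩
  · by_cases hc : pos.contains x = true
    · -- duplicate branch in A, appending occurrence in B
      obtain ⟨a, t, hpt, hsa⟩ := h2 x hc
      have hsc : seen.contains x = true := by rw [h1]; exact hc
      have hcc : ¬ seen.contains x = false := by simp [hsc]
      have hA : aPair (seen, P) (n, x) = (seen, P ++ [(a, n)]) := by
        simp only [aPair]
        rw [if_pos hx0, if_neg hcc, hsa]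
      have hposc : ∀ (w : List Int) v, (pos.insert x w).contains v = pos.contains v := by
        intro w v
        rw [PySem.Dict.contains_insert]
        by_cases hvx : v = x
        · subst hvx; simp [hc]
        · simp [hvx]
      have haltn : a < n := h5 x hc a (by rw [hpt]; exact List.mem_cons_self)
      by_cases ht : t = []
      · -- second occurrence: B records x in `order` now
        subst ht
        have hl2 : ([a] ++ [n]).length = 2 := rfl
        have hB : bLoop (pos, ord) (n, x) = (pos.insert x [a, n], ord ++ [x]) := by
          simp only [bLoop]
          rw [if_pos hx0, hpt, if_pos hl2]
          rfl
        have hxord : x ∉ ord := by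
          intro hmem
          have := ((h3 x).mp hmem).2
          rw [hpt] at this
          simp at this
        have hafresh : a ∉ P.map (fun p => p.1) := by
          intro hmem
          have hmem' : a ∈ PySem.Set.ofList (P.map (fun p => p.1)) :=
            (PySem.Set.mem_ofList _ _).mpr hmem
          rw [h6] at hmem'
          obtain ⟨v', hv', hgv'⟩ := List.mem_map.mp hmem'
          have hcv' := ((h3 v').mp hv').1
          have hvx : v' = x := h4 v' x hcv' hc (by rw [hgv', hsa])
          exact hxord (hvx ▸ hv')
        have hfilter : P.filter (fun p => p.1 == a) = [] := by
          rw [List.filter_eq_nil_iff]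
          intro p hp hbeq
          exact hafresh (List.mem_map.mpr ⟨p, hp, by simpa using hbeq⟩)
        rw [hA, hB]
        dsimp only
        refine ⟨?_, ?_, ?_, ?_, ?_, ?_, ?_, ?_⟩
        · intro v; rw [hposc]; exact h1 v
        · intro v hv
          rw [hposc] at hv
          rw [PySem.Dict.getD_insert]
          by_cases hvx : v = x
          · subst hvx; simp [hsa]
          · rw [if_neg hvx]; exact h2 v hv
        · intro v
          rw [hposc, PySem.Dict.getD_insert]
          by_cases hvx : v = x
          · subst hvx
            simp [hc]
          · have hmm : v ∈ ord ++ [x] ↔ v ∈ ord := by simp [hvx]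
            rw [hmm, if_neg hvx]
            exact h3 v
        · intro v w hv hw heq
          rw [hposc] at hv hw
          exact h4 v w hv hw heq
        · intro v hv j hj
          rw [hposc] at hv
          rw [PySem.Dict.getD_insert] at hj
          by_cases hvx : v = x
          · rw [if_pos hvx] at hj
            simp at hj
            rcases hj with hj | hj <;> omega
          · rw [if_neg hvx] at hj
            have := h5 v hv j hj; omega
        · rw [List.map_append]
          simp only [List.map_cons, List.map_nil]
          rw [PySem.Set.ofList_append_singleton,
            PySem.Set.add_of_not_mem (fun hm => hafresh ((PySem.Set.mem_ofList _ _).mp hm)),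
            h6, List.map_append]
          simp [hsa]
        · intro v hv
          rcases List.mem_append.mp hv with hv' | hv'
          · have hvx : v ≠ x := fun e => hxord (e ▸ hv')
            have hkne : seen.getD v 0 ≠ a := by
              intro hk
              exact hvx (h4 v x ((h3 v).mp hv').1 hc (by rw [hk, hsa]))
            rw [List.filter_append, PySem.Dict.getD_insert, if_neg hvx]
            have : List.filter (fun p => p.1 == seen.getD v 0) [(a, n)] = [] := by
              simp [Ne.symm hkne]
            rw [this, List.append_nil]
            exact h7 v hv'
          · have hvx : v = x := by simpa using hv'
            subst hvx
            rw [hsa, List.filter_append, hfilter, PySem.Dict.getD_insert, if_pos rfl]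
            simp
        · have hdisj : List.Disjoint ord [x] := by
            intro y hy hy2
            simp only [List.mem_singleton] at hy2
            exact hxord (hy2 ▸ hy)
          exact List.Nodup.append h8 (List.nodup_singleton x) hdisj
      · -- third or later occurrence: x already recorded in `order`
        have hlen : ((a :: t) ++ [n]).length ≠ 2 := by
          rcases t with _ | ⟨y, ys⟩
          · exact absurd rfl ht
          · simp only [List.length_append, List.length_cons, List.length_nil]; omega
        have hB : bLoop (pos, ord) (n, x) = (pos.insert x ((a :: t) ++ [n]), ord) := by
          simp only [bLoop]
          rw [if_pos hx0, hpt, if_neg hlen]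
        have hxord : x ∈ ord := (h3 x).mpr ⟨hc, by
          rw [hpt]
          rcases t with _ | ⟨y, ys⟩
          · exact absurd rfl ht
          · simp only [List.length_cons]; omega⟩
        have hain : a ∈ PySem.Set.ofList (P.map (fun p => p.1)) := by
          rw [h6]; exact List.mem_map.mpr ⟨x, hxord, hsa⟩
        rw [hA, hB]
        dsimp only
        refine ⟨?_, ?_, ?_, ?_, ?_, ?_, ?_, ?_⟩
        · intro v; rw [hposc]; exact h1 v
        · intro v hv
          rw [hposc] at hv
          rw [PySem.Dict.getD_insert]
          by_cases hvx : v = x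
          · subst hvx; exact ⟨a, t ++ [n], by simp, hsa⟩
          · rw [if_neg hvx]; exact h2 v hv
        · intro v
          rw [hposc, PySem.Dict.getD_insert]
          by_cases hvx : v = x
          · subst hvx
            simp [hc, hxord]
          · rw [if_neg hvx]
            exact h3 v
        · intro v w hv hw heq
          rw [hposc] at hv hw
          exact h4 v w hv hw heq
        · intro v hv j hj
          rw [hposc] at hv
          rw [PySem.Dict.getD_insert] at hj
          by_cases hvx : v = x
          · rw [if_pos hvx] at hj
            rcases List.mem_cons.mp hj with hj | hj
            · subst hj; omega
            · rcases List.mem_append.mp hj with hj | hj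
              · have := h5 x hc j (by rw [hpt]; exact List.mem_cons_of_mem a hj); omega
              · simp only [List.mem_singleton] at hj; omega
          · rw [if_neg hvx] at hj
            have := h5 v hv j hj; omega
        · rw [List.map_append]
          simp only [List.map_cons, List.map_nil]
          rw [PySem.Set.ofList_append_singleton, PySem.Set.add_of_mem hain, h6]
        · intro v hv
          by_cases hvx : v = x
          · subst hvx
            rw [hsa, List.filter_append, PySem.Dict.getD_insert, if_pos rfl]
            have hfa : List.filter (fun p => p.1 == a) [(a, n)] = [(a, n)] := by simp
            rw [hfa, List.map_append]
            have hold := h7 v hv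
            rw [hsa] at hold
            rw [← List.cons_append, hold, hpt]
            simp
          · have hkne : seen.getD v 0 ≠ a := by
              intro hk
              exact hvx (h4 v x ((h3 v).mp hv).1 hc (by rw [hk, hsa]))
            rw [List.filter_append, PySem.Dict.getD_insert, if_neg hvx]
            have : List.filter (fun p => p.1 == seen.getD v 0) [(a, n)] = [] := by
              simp [Ne.symm hkne]
            rw [this, List.append_nil]
            exact h7 v hv
        · exact h8
    · -- first occurrence of a nonzero value
      have hc' : pos.contains x = false := by simpa using hc
      have hsc : seen.contains x = false := by rw [h1]; exact hc'
      have hgd : pos.getD x [] = [] := PySem.Dict.getD_of_not_contains _ _ hc'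
      have hA : aPair (seen, P) (n, x) = (seen.insert x n, P) := by
        simp only [aPair]
        rw [if_pos hx0, if_pos hsc]
      have hB : bLoop (pos, ord) (n, x) = (pos.insert x [n], ord) := by
        have hl1 : ¬(([] : List Int) ++ [n]).length = 2 := by simp
        simp only [bLoop]
        rw [if_pos hx0, hgd, if_neg hl1]
        rfl
      have hnotord : x ∉ ord := fun hm => by
        have := ((h3 x).mp hm).1; rw [hc'] at this; exact Bool.false_ne_true this
      rw [hA, hB]
      dsimp only
      refine ⟨?_, ?_, ?_, ?_, ?_, ?_, ?_, ?_⟩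
      · intro v
        rw [PySem.Dict.contains_insert, PySem.Dict.contains_insert]
        rw [h1]
      · intro v hv
        rw [PySem.Dict.getD_insert, PySem.Dict.getD_insert]
        by_cases hvx : v = x
        · subst hvx; simp
        · rw [if_neg hvx, if_neg hvx]
          rw [PySem.Dict.contains_insert] at hv
          simp [hvx] at hv
          exact h2 v hv
      · intro v
        rw [PySem.Dict.contains_insert, PySem.Dict.getD_insert]
        by_cases hvx : v = x
        · subst hvx
          simp [hnotord]
        · simp only [if_neg hvx]
          have : (v == x) = false := by simp [hvx]
          rw [this, Bool.false_or]
          exact h3 v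
      · intro v w hv hw heq
        rw [PySem.Dict.contains_insert] at hv hw
        rw [PySem.Dict.getD_insert, PySem.Dict.getD_insert] at heq
        by_cases hvx : v = x <;> by_cases hwx : w = x
        · rw [hvx, hwx]
        · exfalso
          rw [if_pos hvx, if_neg hwx] at heq
          simp [hwx] at hw
          obtain ⟨aw, tw, hw1, hw2⟩ := h2 w hw
          have : aw < n := h5 w hw aw (by rw [hw1]; exact List.mem_cons_self)
          rw [hw2] at heq; omega
        · exfalso
          rw [if_neg hvx, if_pos hwx] at heq
          simp [hvx] at hv
          obtain ⟨av, tv, hv1, hv2⟩ := h2 v hv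
          have : av < n := h5 v hv av (by rw [hv1]; exact List.mem_cons_self)
          rw [hv2] at heq; omega
        · rw [if_neg hvx, if_neg hwx] at heq
          simp [hvx] at hv
          simp [hwx] at hw
          exact h4 v w hv hw heq
      · intro v hv j hj
        rw [PySem.Dict.getD_insert] at hj
        by_cases hvx : v = x
        · rw [if_pos hvx] at hj
          simp at hj; omega
        · rw [if_neg hvx] at hj
          rw [PySem.Dict.contains_insert] at hv
          simp [hvx] at hv
          have := h5 v hv j hj; omega
      · rw [h6]
        apply List.map_congr_left
        intro v hv
        have hvx : v ≠ x := by
          intro e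
          exact hnotord (e ▸ hv)
        rw [PySem.Dict.getD_insert, if_neg hvx]
      · intro v hv
        have hvx : v ≠ x := fun e => hnotord (e ▸ hv)
        rw [PySem.Dict.getD_insert, if_neg hvx, PySem.Dict.getD_insert, if_neg hvx]
        exact h7 v hv
      · exact h8

theorem pvInv_fold (xs : List Int) : ∀ (n : Int) (seen : PySem.Dict Int Int) (P : List (Int × Int))
    (pos : PySem.Dict Int (List Int)) (ord : List Int), pvInv n seen P pos ord →
    pvInv (n + (xs.length : Int)) ((PySem.List.enumerate xs n).foldl aPair (seen, P)).1
      ((PySem.List.enumerate xs n).foldl aPair (seen, P)).2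
      ((PySem.List.enumerate xs n).foldl bLoop (pos, ord)).1
      ((PySem.List.enumerate xs n).foldl bLoop (pos, ord)).2 := by
  induction xs with
  | nil =>
    intro n seen P pos ord h
    simpa using h
  | cons x xs ih =>
    intro n seen P pos ord h
    simp only [PySem.List.enumerate_cons, List.foldl_cons, List.length_cons]
    have h1 := pvInv_one n seen P pos ord x h
    have h2 := ih (n + 1) (aPair (seen, P) (n, x)).1 (aPair (seen, P) (n, x)).2
      (bLoop (pos, ord) (n, x)).1 (bLoop (pos, ord) (n, x)).2 h1
    have heq : n + ((xs.length + 1 : Nat) : Int) = (n + 1) + (xs.length : Int) := by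
      push_cast; ring
    rw [heq]
    exact h2

-- ===== VERDICT (by name: the statement is the Claim_ definition above) =====
theorem find_duplicates_except_zero_spec : Claim_equal_find_duplicates_except_zero := by
  unfold Claim_equal_find_duplicates_except_zero Spec_find_duplicates_except_zero
  intro list _
  simp only [find_duplicates_except_zero, find_duplicates_except_zero_alt]
  -- the index loop of A is the enumerate loop on pairs
  have hrw : (PySem.List.pyRange 0 (PySem.List.len list) 1).foldl
      (fun st i => aLoop1 st (i, PySem.List.pyGetD list i 0))
      (PySem.Dict.empty, ([] : List (List Int)))
      = (PySem.List.enumerate list 0).foldl aLoop1 (PySem.Dict.empty, []) := by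
    rw [PySem.List.enumerate_eq_map_pyRange (d := 0), List.foldl_map]
  have hpair := afold_pair (PySem.List.enumerate list 0) PySem.Dict.empty []
  simp only [List.map_nil] at hpair
  rw [hrw, hpair]
  set q := (PySem.List.enumerate list 0).foldl aPair (PySem.Dict.empty, []) with hq
  set r := (PySem.List.enumerate list 0).foldl bLoop (PySem.Dict.empty, []) with hr
  -- the regroup loop in pair form
  have hregroup : (q.2.map (fun p => [p.1, p.2])).foldl
      (fun (g : PySem.Dict Int (List Int)) sub =>
        g.modify (PySem.List.pyGetD sub 0 0) [] (· ++ PySem.List.slice sub (some 1) none))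
      PySem.Dict.empty
      = q.2.foldl (fun (g : PySem.Dict Int (List Int)) p => g.modify p.1 [] (· ++ [p.2]))
        PySem.Dict.empty := by
    rw [List.foldl_map]
    simp only [PySem.List.pyGetD_zero_cons, PySem.List.slice_from_one, List.tail_cons]
  rw [hregroup]
  set G := q.2.foldl (fun (g : PySem.Dict Int (List Int)) p => g.modify p.1 [] (· ++ [p.2]))
    PySem.Dict.empty with hG
  have hkeys : G.keys = PySem.Set.ofList (q.2.map (fun p => p.1)) := by
    rw [hG, PySem.Dict.keys_foldl_modify_key]
    simp [PySem.Dict.keys_empty, PySem.Set.update_nil_left]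
  have hgetD : ∀ k, G.getD k [] = (q.2.filter (fun p => p.1 == k)).map (fun p => p.2) := by
    intro k
    rw [hG, PySem.Dict.getD_foldl_modify_append]
    simp [PySem.Dict.getD_empty]
  have hout : G.keys.foldl (fun out k => out ++ [k :: G.getD k []]) [] =
      G.keys.map (fun k => k :: G.getD k []) := by
    rw [PySem.List.foldl_append_singleton_eq_map, List.nil_append]
  rw [hout, hkeys]
  -- the invariant at the final states
  have hinit : pvInv 0 PySem.Dict.empty [] PySem.Dict.empty [] := by
    refine ⟨?_, ?_, ?_, ?_, ?_, ?_, ?_, ?_⟩ <;>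
      simp [PySem.Dict.contains_empty, PySem.Set.ofList_nil]
  have hinv := pvInv_fold list 0 PySem.Dict.empty [] PySem.Dict.empty [] hinit
  obtain ⟨_, _, _, _, _, h6, h7, _⟩ := hinv
  rw [← hq, ← hr] at h6 h7
  rw [h6, List.map_map]
  apply List.map_congr_left
  intro v hv
  have := h7 v hv
  simp only [Function.comp]
  rw [hgetD]
  exact this
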